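-- pv_equiv track=rewrite | github.com/arturoornelasb/tibia-bonelord-469-cipher | scripts/core/tibia_lore_attack.py | is_anagram_plus_n
-- ===== SOURCE A (Python) =====
-- from collections import Counter
--
-- def is_anagram_plus_n(word, target, max_extra=1):
--     """Check if word is an anagram of target + up to max_extra letters."""
--     wc = Counter(word.upper())
--     tc = Counter(target.upper())
--
--     # target should be shorter or equal
--     if len(target) > len(word) + max_extra:
--         return None
--     if len(target) < len(word) - max_extra:
--         return None
--
--     # Check: can we get from word to target by adding/removing at most max_extra?
--     diff = Counter()
--     for c in set(list(wc.keys()) + list(tc.keys())):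
--         d = wc.get(c, 0) - tc.get(c, 0)
--         if d > 0:
--             diff[c] = d
--
--     extras = sum(diff.values())
--     missing = sum(max(tc.get(c, 0) - wc.get(c, 0), 0) for c in tc)
--
--     if extras <= max_extra and missing == 0:
--         extra_letters = ''.join(c * diff[c] for c in sorted(diff))
--         return extra_letters if extra_letters else "(exact)"
--     return None
-- ===== SOURCE B (Python) =====
-- def is_anagram_plus_n(word, target, max_extra=1):
--     """Check if word is an anagram of target + up to max_extra letters."""
--     w = sorted(word.upper())
--     t = sorted(target.upper())
--     extras = []
--     missing = []
--     i = j = 0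
--     while i < len(w) and j < len(t):
--         if w[i] == t[j]:
--             i += 1
--             j += 1
--         elif w[i] < t[j]:
--             extras.append(w[i])
--             i += 1
--         else:
--             missing.append(t[j])
--             j += 1
--     extras.extend(w[i:])
--     missing.extend(t[j:])
--     if missing or len(extras) > max_extra:
--         return None
--     return ''.join(extras) or "(exact)"
-- ===== Notes on version B (the rewrite author's own statement) =====
-- stated objective: alternative
-- what changed: Replaces the two Counter tables, the key-set diff loop and the per-key join by sorting both uppercased strings once and doing a single two-pointer merge that emits the extra and missing letters directly (the redundant length guards, provably implied by the final test, are dropped).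
import Mathlib
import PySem

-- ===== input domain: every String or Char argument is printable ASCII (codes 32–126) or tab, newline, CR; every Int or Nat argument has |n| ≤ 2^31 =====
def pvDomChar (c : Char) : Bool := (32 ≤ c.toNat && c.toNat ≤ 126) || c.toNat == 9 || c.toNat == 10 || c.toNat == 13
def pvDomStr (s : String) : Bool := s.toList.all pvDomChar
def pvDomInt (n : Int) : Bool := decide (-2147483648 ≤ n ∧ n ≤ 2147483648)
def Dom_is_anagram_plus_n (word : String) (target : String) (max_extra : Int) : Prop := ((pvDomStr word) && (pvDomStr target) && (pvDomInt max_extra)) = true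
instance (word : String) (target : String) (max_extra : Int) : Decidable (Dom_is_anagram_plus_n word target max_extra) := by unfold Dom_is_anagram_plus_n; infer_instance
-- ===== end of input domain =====

-- B replaces the Counter/diff-dict pipeline by sort-both-then-two-pointer-merge (alternative algorithm).

-- ===== PORT A =====
def is_anagram_plus_n (word : String) (target : String) (max_extra : Int) : Option String :=
  let wc := PySem.Dict.counter (PySem.Str.upper word).toList
  let tc := PySem.Dict.counter (PySem.Str.upper target).toList
  if (PySem.Str.len target : Int) > (PySem.Str.len word : Int) + max_extra then none
  else if (PySem.Str.len target : Int) < (PySem.Str.len word : Int) - max_extra then none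
  else
    let ks := PySem.Set.ofList (wc.keys ++ tc.keys)
    let diff := ks.foldl (fun d c =>
        let dv := wc.getD c 0 - tc.getD c 0
        if 0 < dv then d.insert c dv else d) PySem.Dict.empty
    let extras := diff.values.sum
    let missing := (tc.keys.map (fun c => max (tc.getD c 0 - wc.getD c 0) 0)).sum
    if extras ≤ max_extra ∧ missing = 0 then
      let extra_letters := (PySem.List.sorted diff.keys (fun x => x) false).flatMap
        (fun c => List.replicate (diff.getD c 0).toNat c)
      if extra_letters = [] then some "(exact)" else some (String.mk extra_letters)
    else none

-- ===== PORT B =====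
-- the two-pointer while loop of Source B as structural recursion on the two sorted lists
def pvMerge : List Char → List Char → List Char × List Char
  | [], ts => ([], ts)
  | w :: ws, [] => (w :: ws, [])
  | w :: ws, t :: ts =>
    if w = t then pvMerge ws ts
    else if w < t then
      let r := pvMerge ws (t :: ts); (w :: r.1, r.2)
    else
      let r := pvMerge (w :: ws) ts; (r.1, t :: r.2)

def is_anagram_plus_n_alt (word : String) (target : String) (max_extra : Int) : Option String :=
  let w := PySem.List.sorted (PySem.Str.upper word).toList (fun x => x) false
  let t := PySem.List.sorted (PySem.Str.upper target).toList (fun x => x) false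
  let r := pvMerge w t
  if r.2 ≠ [] ∨ max_extra < (r.1.length : Int) then none
  else if r.1 = [] then some "(exact)" else some (String.mk r.1)

-- ===== PRECONDITION & SPEC =====
def Spec_is_anagram_plus_n (word : String) (target : String) (max_extra : Int) (out : Option String) : Prop := out = is_anagram_plus_n_alt word target max_extra
instance (word : String) (target : String) (max_extra : Int) (out : Option String) : Decidable (Spec_is_anagram_plus_n word target max_extra out) := by unfold Spec_is_anagram_plus_n; infer_instance

-- ===== CLAIM (what is proved, stated in full; the proofs are below) =====
def Claim_equal_is_anagram_plus_n : Prop := ∀ (word : String) (target : String) (max_extra : Int), Dom_is_anagram_plus_n word target max_extra → Spec_is_anagram_plus_n word target max_extra (is_anagram_plus_n word target max_extra)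

-- ===== LEMMAS AND PROOFS =====

-- ---- B-side: the merge's two outputs are sublists / have the count characterisation ----

theorem pvMerge_fst_sublist (w t : List Char) : (pvMerge w t).1.Sublist w := by
  fun_induction pvMerge w t with
  | case1 ts => simp
  | case2 w ws => simp
  | case3 ws q ts ih => exact ih.trans (List.sublist_cons_self _ _)
  | case4 w ws t ts hne hlt =>
    rename_i r ih
    exact List.cons_sublist_cons.mpr ih
  | case5 w ws t ts hne hnlt =>
    rename_i r ih
    exact ih


theorem pvMerge_count (w t : List Char) (hw : w.Pairwise (· ≤ ·)) (ht : t.Pairwise (· ≤ ·)) (c : Char) :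
    (pvMerge w t).1.count c = w.count c - t.count c ∧
    (pvMerge w t).2.count c = t.count c - w.count c := by
  fun_induction pvMerge w t with
  | case1 ts => simp
  | case2 w ws => simp
  | case3 ws q ts ih =>
    obtain ⟨h1, h2⟩ := ih (List.Pairwise.of_cons hw) (List.Pairwise.of_cons ht)
    constructor
    · rw [h1]; by_cases hc : q = c <;> simp [List.count_cons, hc] <;> omega
    · rw [h2]; by_cases hc : q = c <;> simp [List.count_cons, hc] <;> omega
  | case4 w ws t ts hne hlt =>
    rename_i r ih
    have hwt : w ∉ t :: ts := by
      intro hm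
      rcases List.mem_cons.mp hm with h | h
      · exact hne h
      · exact absurd (List.rel_of_pairwise_cons ht h) (not_le.mpr hlt)
    obtain ⟨h1, h2⟩ := ih (List.Pairwise.of_cons hw) ht
    by_cases hc : w = c
    · subst hc
      have h0 : (t :: ts).count w = 0 := List.count_eq_zero.mpr hwt
      refine ⟨?_, ?_⟩
      · show (w :: (pvMerge ws (t :: ts)).1).count w = _
        simp [List.count_cons, h1, h0]
      · show (pvMerge ws (t :: ts)).2.count w = _
        simp [h2, h0, List.count_cons]
    · refine ⟨?_, ?_⟩
      · show (w :: (pvMerge ws (t :: ts)).1).count c = _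
        simp [List.count_cons, hc, h1]
      · show (pvMerge ws (t :: ts)).2.count c = _
        simp [h2, List.count_cons, hc]
  | case5 w ws t ts hne hnlt =>
    rename_i r ih
    have hlt : t < w := lt_of_le_of_ne (not_lt.mp hnlt) (fun h => hne h.symm)
    have htw : t ∉ w :: ws := by
      intro hm
      rcases List.mem_cons.mp hm with h | h
      · exact hne h.symm
      · exact absurd (List.rel_of_pairwise_cons hw h) (not_le.mpr hlt)
    obtain ⟨h1, h2⟩ := ih hw (List.Pairwise.of_cons ht)
    by_cases hc : t = c
    · subst hc
      have h0 : (w :: ws).count t = 0 := List.count_eq_zero.mpr htw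
      refine ⟨?_, ?_⟩
      · show (pvMerge (w :: ws) ts).1.count t = _
        simp [h1, h0, List.count_cons]
      · show (t :: (pvMerge (w :: ws) ts).2).count t = _
        simp [List.count_cons, h2, h0]
    · refine ⟨?_, ?_⟩
      · show (pvMerge (w :: ws) ts).1.count c = _
        simp [h1, List.count_cons, hc]
      · show (t :: (pvMerge (w :: ws) ts).2).count c = _
        simp [List.count_cons, hc, h2]


theorem get?_mk_map (g : Char → Int) (c : Char) (l : List Char) :
    (PySem.Dict.mk (l.map (fun x => (x, g x)))).get? c = if c ∈ l then some (g c) else none := by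
  induction l with
  | nil => simp [PySem.Dict.get?]
  | cons a l ih =>
    simp only [List.map_cons, PySem.Dict.get?_mk_cons]
    by_cases h : a = c
    · subst h; simp
    · simp [h, ih, Ne.symm h]


theorem getD_mk_map (g : Char → Int) (c : Char) (l : List Char) :
    (PySem.Dict.mk (l.map (fun x => (x, g x)))).getD c 0 = if c ∈ l then g c else 0 := by
  by_cases h : c ∈ l
  · have h1 : (PySem.Dict.mk (l.map (fun x => (x, g x)))).get? c = some (g c) := by
      rw [get?_mk_map]; simp [h]
    rw [PySem.Dict.getD_of_get?_eq_some _ 0 h1]; simp [h]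
  · have h1 : (PySem.Dict.mk (l.map (fun x => (x, g x)))).get? c = none := by
      rw [get?_mk_map]; simp [h]
    rw [PySem.Dict.getD_of_get?_eq_none _ 0 h1]; simp [h]

-- ---- generic list lemmas ----


theorem count_flatMap_replicate (g : Char → Nat) (x : Char) (l : List Char) (hl : l.Nodup) :
    (l.flatMap (fun c => List.replicate (g c) c)).count x = if x ∈ l then g x else 0 := by
  induction l with
  | nil => simp
  | cons a l ih =>
    have hal : a ∉ l := (List.nodup_cons.mp hl).1
    have ih2 := ih (List.nodup_cons.mp hl).2
    simp only [List.flatMap_cons, List.count_append, List.count_replicate, ih2, List.mem_cons]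
    by_cases h : x = a
    · subst h; simp [hal]
    · simp [h]
      exact fun hh => absurd hh.symm h


theorem pairwise_flatMap_replicate (g : Char → Nat) (l : List Char)
    (hl : l.Pairwise (· < ·)) :
    (l.flatMap (fun c => List.replicate (g c) c)).Pairwise (· ≤ ·) := by
  induction l with
  | nil => simp
  | cons a l ih =>
    rw [List.flatMap_cons, List.pairwise_append]
    refine ⟨by
      apply List.pairwise_replicate.mpr
      exact Or.inr le_rfl, ih (List.Pairwise.of_cons hl), ?_⟩
    intro x hx y hy
    have hxa : x = a := List.eq_of_mem_replicate hx
    obtain ⟨c, hc, hyc⟩ := List.mem_flatMap.mp hy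
    have hyc' : y = c := List.eq_of_mem_replicate hyc
    subst hxa hyc'
    exact le_of_lt (List.rel_of_pairwise_cons hl hc)


theorem sum_int_eq_zero_iff (l : List Int) (h : ∀ x ∈ l, 0 ≤ x) : l.sum = 0 ↔ ∀ x ∈ l, x = 0 := by
  induction l with
  | nil => simp
  | cons a l ih =>
    have ha := h a (by simp)
    have hl : ∀ x ∈ l, 0 ≤ x := fun x hx => h x (by simp [hx])
    have hs : 0 ≤ l.sum := List.sum_nonneg hl
    simp only [List.sum_cons, List.mem_cons]
    constructor
    · intro h0
      have : a = 0 ∧ l.sum = 0 := by omega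
      exact fun x hx => hx.elim (fun e => e ▸ this.1) (fun hx => (ih hl).mp this.2 x hx)
    · intro h0
      have : l.sum = 0 := (ih hl).mpr (fun x hx => h0 x (Or.inr hx))
      have := h0 a (Or.inl rfl)
      omega


theorem sum_map_toNat (f : Char → Int) (l : List Char) (h : ∀ c ∈ l, 0 ≤ f c) :
    (l.map f).sum = ((l.map (fun c => (f c).toNat)).sum : Nat) := by
  induction l with
  | nil => simp
  | cons a l ih =>
    have ha := h a (by simp)
    have ih2 := ih (fun c hc => h c (by simp [hc]))
    simp only [List.map_cons, List.sum_cons, ih2]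
    push_cast
    omega

-- ---- main equivalence ----



theorem flatMap_congr_mem {α β : Type} (l : List α) (g h : α → List β)
    (hg : ∀ x ∈ l, g x = h x) : l.flatMap g = l.flatMap h := by
  induction l with
  | nil => rfl
  | cons a l ih =>
    rw [List.flatMap_cons, List.flatMap_cons, hg a (by simp),
      ih (fun x hx => hg x (by simp [hx]))]

theorem len_upper (l : List Char) : (PySem.Chars.upper l).length = l.length := by
  simp [PySem.Chars.upper]

theorem core_equiv (W T : List Char) (m : Int) :
    (if ((T.length : Int) > (W.length : Int) + m) then (none : Option String)
     else if ((T.length : Int) < (W.length : Int) - m) then none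
     else
       let ks := PySem.Set.ofList ((PySem.Dict.counter W).keys ++ (PySem.Dict.counter T).keys)
       let diff := ks.foldl (fun d c =>
           let dv := (PySem.Dict.counter W).getD c 0 - (PySem.Dict.counter T).getD c 0
           if 0 < dv then d.insert c dv else d) PySem.Dict.empty
       let extras := diff.values.sum
       let missing := ((PySem.Dict.counter T).keys.map
         (fun c => max ((PySem.Dict.counter T).getD c 0 - (PySem.Dict.counter W).getD c 0) 0)).sum
       if extras ≤ m ∧ missing = 0 then
         let el := (PySem.List.sorted diff.keys (fun x => x) false).flatMap
           (fun c => List.replicate ((diff.getD c 0).toNat) c)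
         if el = [] then some "(exact)" else some (String.mk el)
       else none) =
    (let w := PySem.List.sorted W (fun x => x) false
     let t := PySem.List.sorted T (fun x => x) false
     let r := pvMerge w t
     if r.2 ≠ [] ∨ m < (r.1.length : Int) then none
     else if r.1 = [] then some "(exact)" else some (String.mk r.1)) := by
  simp only [PySem.Dict.keys_counter, PySem.Dict.getD_counter]
  rw [PySem.List.foldl_ite_eq_foldl_filter
    (p := fun c => (0:Int) < (List.count c W : Int) - (List.count c T : Int))
    (f := fun (d : PySem.Dict Char Int) c => d.insert c ((List.count c W : Int) - (List.count c T : Int)))]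
  set K := PySem.Set.ofList (PySem.Set.ofList W ++ PySem.Set.ofList T) with hK
  set F := K.filter (fun c => decide ((0:Int) < (List.count c W : Int) - (List.count c T : Int))) with hF
  have hFnd : F.Nodup := (PySem.Set.nodup_ofList _).filter _
  have hd : List.foldl (fun (d : PySem.Dict Char Int) c =>
      d.insert c ((List.count c W : Int) - (List.count c T : Int))) PySem.Dict.empty F
      = PySem.Dict.mk (F.map (fun c => (c, (List.count c W : Int) - (List.count c T : Int)))) := by
    apply PySem.Dict.ext
    have := PySem.Dict.items_foldl_insert_fresh F (fun c => c)
      (fun c => (List.count c W : Int) - (List.count c T : Int)) PySem.Dict.empty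
      (fun a _ => by simp [PySem.Dict.empty, PySem.Dict.contains])
      (by simpa using hFnd)
    simpa [PySem.Dict.empty] using this
  rw [hd]
  simp only [PySem.Dict.values_mk, PySem.Dict.keys_mk, List.map_map, Function.comp_def,
    getD_mk_map, List.map_id']
  rw [flatMap_congr_mem (PySem.List.sorted F (fun x => x) false) _
    (fun c => List.replicate ((List.count c W : Int) - (List.count c T : Int)).toNat c)
    (fun c hc => by rw [if_pos ((PySem.List.mem_sorted F (fun x => x) false c).mp hc)])]
  set w := PySem.List.sorted W (fun x => x) false with hwdef
  set t := PySem.List.sorted T (fun x => x) false with htdef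
  set sF := PySem.List.sorted F (fun x => x) false with hsFdef
  set E := (pvMerge w t).1 with hEdef
  set M := (pvMerge w t).2 with hMdef
  have hpw : List.Pairwise (· ≤ ·) w := PySem.List.sorted_pairwise W (fun x => x)
  have hpt : List.Pairwise (· ≤ ·) t := PySem.List.sorted_pairwise T (fun x => x)
  have hcw : ∀ c, List.count c w = List.count c W :=
    fun c => (PySem.List.sorted_perm W (fun x => x) false).count_eq c
  have hct : ∀ c, List.count c t = List.count c T :=
    fun c => (PySem.List.sorted_perm T (fun x => x) false).count_eq c
  have hcE : ∀ c, List.count c E = List.count c W - List.count c T := by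
    intro c; rw [hEdef, (pvMerge_count w t hpw hpt c).1, hcw, hct]
  have hcM : ∀ c, List.count c M = List.count c T - List.count c W := by
    intro c; rw [hMdef, (pvMerge_count w t hpw hpt c).2, hcw, hct]
  have hmemF : ∀ c, c ∈ F ↔ (c ∈ W ∨ c ∈ T) ∧ (0:Int) < (List.count c W : Int) - (List.count c T : Int) := by
    intro c
    rw [hF, List.mem_filter, hK]
    simp [PySem.Set.mem_ofList, List.mem_append]
  have hsFperm : sF.Perm F := PySem.List.sorted_perm F (fun x => x) false
  have hsFnd : sF.Nodup := hsFperm.nodup_iff.mpr hFnd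
  have hsFlt : sF.Pairwise (· < ·) := by
    have h1 : sF.Pairwise (· ≤ ·) := PySem.List.sorted_pairwise F (fun x => x)
    have h2 : sF.Pairwise (· ≠ ·) := hsFnd
    exact (h1.and h2).imp (fun h => lt_of_le_of_ne h.1 h.2)
  have hLAE : sF.flatMap (fun c => List.replicate ((List.count c W : Int) - (List.count c T : Int)).toNat c) = E := by
    apply PySem.List.eq_of_perm_of_pairwise_le_of_injective (fun x => x) (fun a b h => h)
    · apply List.perm_iff_count.mpr
      intro x
      rw [count_flatMap_replicate _ x sF hsFnd, hcE]
      by_cases hx : x ∈ sF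
      · have hxF := (PySem.List.mem_sorted F (fun x => x) false x).mp hx
        have := (hmemF x).mp hxF
        rw [if_pos hx]
        omega
      · rw [if_neg hx]
        have hxF : x ∉ F := fun h => hx ((PySem.List.mem_sorted F (fun x => x) false x).mpr h)
        by_cases hxW : x ∈ W
        · have : ¬ (0:Int) < (List.count x W : Int) - (List.count x T : Int) :=
            fun h => hxF ((hmemF x).mpr ⟨Or.inl hxW, h⟩)
          omega
        · have : List.count x W = 0 := List.count_eq_zero.mpr hxW
          omega
    · exact pairwise_flatMap_replicate _ _ hsFlt
    · exact List.Pairwise.sublist (pvMerge_fst_sublist w t) hpw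
  have hFpos : ∀ c ∈ F, (0:Int) ≤ (List.count c W : Int) - (List.count c T : Int) :=
    fun c hc => le_of_lt ((hmemF c).mp hc).2
  have hsum : (List.map (fun x => (List.count x W : Int) - (List.count x T : Int)) F).sum = (E.length : Int) := by
    rw [sum_map_toNat _ _ hFpos]
    have h1 : E.length = (sF.map (fun c => ((List.count c W : Int) - (List.count c T : Int)).toNat)).sum := by
      rw [← hLAE]
      simp [List.length_flatMap, Function.comp_def]
    have h2 : (sF.map (fun c => ((List.count c W : Int) - (List.count c T : Int)).toNat)).sum
        = (F.map (fun c => ((List.count c W : Int) - (List.count c T : Int)).toNat)).sum :=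
      (hsFperm.map _).sum_eq
    rw [h1, h2]
  have hmiss : (List.map (fun c => max ((List.count c T : Int) - (List.count c W : Int)) 0) (PySem.Set.ofList T)).sum = 0 ↔ M = [] := by
    rw [sum_int_eq_zero_iff _ (by
      intro x hx
      obtain ⟨c, _, rfl⟩ := List.mem_map.mp hx
      exact le_max_right _ _)]
    constructor
    · intro h
      apply List.eq_nil_iff_forall_not_mem.mpr
      intro x hxM
      have hcnt : List.count x M ≠ 0 := fun h0 => (List.count_eq_zero.mp h0) hxM
      rw [hcM x] at hcnt
      by_cases hxT : x ∈ T
      · have := h _ (List.mem_map.mpr ⟨x, (PySem.Set.mem_ofList T x).mpr hxT, rfl⟩)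
        have : (List.count x T : Int) - (List.count x W : Int) ≤ 0 := by
          by_contra hpos
          push_neg at hpos
          rw [max_eq_left (le_of_lt hpos)] at this
          omega
        omega
      · have : List.count x T = 0 := List.count_eq_zero.mpr hxT
        omega
    · intro hM x hx
      obtain ⟨c, hcT, rfl⟩ := List.mem_map.mp hx
      have : List.count c M = 0 := by rw [hM]; rfl
      rw [hcM c] at this
      have : (List.count c T : Int) - (List.count c W : Int) ≤ 0 := by omega
      exact max_eq_right this
  rw [hLAE]
  by_cases hM : M = []
  · have hsub : ∀ c, List.count c T ≤ List.count c W := by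
      intro c
      have h0 : List.count c M = 0 := by rw [hM]; rfl
      rw [hcM c] at h0
      omega
    have hperm2 : W.Perm (T ++ E) := by
      apply List.perm_iff_count.mpr
      intro c
      rw [List.count_append, hcE c]
      have := hsub c
      omega
    have hlen2 : W.length = T.length + E.length := by
      have := hperm2.length_eq
      simpa using this
    by_cases hEm : (E.length : Int) ≤ m
    · have hg1 : ¬ ((T.length : Int) > (W.length : Int) + m) := by
        rw [hlen2]; push_cast; omega
      have hg2 : ¬ ((T.length : Int) < (W.length : Int) - m) := by
        rw [hlen2]; push_cast; omega
      rw [if_neg hg1, if_neg hg2, if_pos ⟨by rw [hsum]; exact hEm, hmiss.mpr hM⟩]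
      have hnB : ¬ (M ≠ [] ∨ m < (E.length : Int)) := by
        rintro (h | h)
        · exact h hM
        · omega
      rw [if_neg hnB]
    · have hcA : ¬ ((List.map (fun x => (List.count x W : Int) - (List.count x T : Int)) F).sum ≤ m ∧
          (List.map (fun c => max ((List.count c T : Int) - (List.count c W : Int)) 0) (PySem.Set.ofList T)).sum = 0) := by
        intro h
        exact hEm (hsum ▸ h.1)
      rw [if_pos (Or.inr (not_le.mp hEm))]
      split_ifs <;> first | rfl | (exact absurd ‹_ ∧ _› hcA)
  · have hcA : ¬ ((List.map (fun x => (List.count x W : Int) - (List.count x T : Int)) F).sum ≤ m ∧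
        (List.map (fun c => max ((List.count c T : Int) - (List.count c W : Int)) 0) (PySem.Set.ofList T)).sum = 0) := by
      intro h
      exact hM (hmiss.mp h.2)
    rw [if_pos (Or.inl hM)]
    split_ifs <;> first | rfl | (exact absurd ‹_ ∧ _› hcA)

-- ===== VERDICT (by name: the statement is the Claim_ definition above) =====
theorem is_anagram_plus_n_spec : Claim_equal_is_anagram_plus_n := by
  intro word target m _
  show is_anagram_plus_n word target m = is_anagram_plus_n_alt word target m
  have hlw : word.toList.length = (PySem.Str.upper word).toList.length := by
    rw [PySem.Str.toList_upper, len_upper]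
  have hlt : target.toList.length = (PySem.Str.upper target).toList.length := by
    rw [PySem.Str.toList_upper, len_upper]
  simp only [is_anagram_plus_n, is_anagram_plus_n_alt, PySem.Str.len_eq, hlw, hlt]
  exact core_equiv _ _ m
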